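-- pv_equiv track=rewrite | github.com/Kiran-Sawant/Data_Structures-and-Algorithms | Exercises/exercise.py | commonOne2
-- ===== SOURCE A (Python) =====
-- def commonOne2(array1:list, array2:list)->bool:
--     """Time complexity: O(n+m)"""
--     hash_table = dict()
--
--     for i, value in enumerate(array1):
--         hash_table[value] = i
--
--     for j in array2:
--         if j in hash_table:
--             return True
--     return False
-- ===== SOURCE B (Python) =====
-- def commonOne2(array1: list, array2: list) -> bool:
--     """Sorted two-pointer merge instead of a hash table; O((n+m) log(n+m))."""
--     a = sorted(array1)
--     b = sorted(array2)
--     i = 0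
--     j = 0
--     while i < len(a) and j < len(b):
--         if a[i] == b[j]:
--             return True
--         if a[i] < b[j]:
--             i += 1
--         else:
--             j += 1
--     return False
-- ===== Notes on version B (the rewrite author's own statement) =====
-- stated objective: alternative
-- what changed: Replaces the hash-table build plus membership scan with sorting both lists and a two-pointer merge that detects a common element in sorted order.
import Mathlib
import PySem

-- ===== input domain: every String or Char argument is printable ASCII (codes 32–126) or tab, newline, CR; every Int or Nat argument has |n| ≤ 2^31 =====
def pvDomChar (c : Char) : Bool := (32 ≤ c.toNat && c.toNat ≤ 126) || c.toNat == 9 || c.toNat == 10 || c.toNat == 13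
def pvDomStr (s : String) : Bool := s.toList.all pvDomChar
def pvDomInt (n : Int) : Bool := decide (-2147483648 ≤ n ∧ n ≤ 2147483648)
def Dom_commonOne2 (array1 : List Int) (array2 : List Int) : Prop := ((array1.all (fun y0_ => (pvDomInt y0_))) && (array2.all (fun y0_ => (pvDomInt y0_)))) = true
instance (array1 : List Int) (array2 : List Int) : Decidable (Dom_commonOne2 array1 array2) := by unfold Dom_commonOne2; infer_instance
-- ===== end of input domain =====

-- B replaces A's hash-table membership test with a sort + two-pointer merge (alternative algorithm, same result).


-- ===== PORT A =====
-- second loop of A: scan array2, early-return True on a key hit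
def commonOne2Scan (ht : PySem.Dict Int Int) : List Int → Bool
  | [] => false
  | j :: rest => if ht.contains j then true else commonOne2Scan ht rest

def commonOne2 (array1 : List Int) (array2 : List Int) : Bool :=
  let hash_table : PySem.Dict Int Int :=
    (PySem.List.enumerate array1 0).foldl (fun d p => d.insert p.2 p.1) PySem.Dict.empty
  commonOne2Scan hash_table array2

-- ===== PORT B =====
-- two-pointer merge over the sorted copies: advance the side with the smaller head
def commonOne2Merge : List Int → List Int → Bool
  | [], _ => false
  | _ :: _, [] => false
  | x :: xs, y :: ys =>
    if x = y then true
    else if x < y then commonOne2Merge xs (y :: ys)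
    else commonOne2Merge (x :: xs) ys
termination_by xs ys => xs.length + ys.length

def commonOne2_alt (array1 : List Int) (array2 : List Int) : Bool :=
  commonOne2Merge (PySem.List.sorted array1 (fun x => x) false)
                  (PySem.List.sorted array2 (fun x => x) false)

-- ===== PRECONDITION & SPEC =====
def Spec_commonOne2 (array1 : List Int) (array2 : List Int) (out : Bool) : Prop := out = commonOne2_alt array1 array2
instance (array1 : List Int) (array2 : List Int) (out : Bool) : Decidable (Spec_commonOne2 array1 array2 out) := by unfold Spec_commonOne2; infer_instance

-- ===== CLAIM (what is proved, stated in full; the proofs are below) =====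
def Claim_equal_commonOne2 : Prop := ∀ (array1 : List Int) (array2 : List Int), Dom_commonOne2 array1 array2 → Spec_commonOne2 array1 array2 (commonOne2 array1 array2)

-- ===== LEMMAS AND PROOFS =====

-- the dict built from enumerate(array1) contains exactly the elements of array1 as keys
theorem contains_foldl_insert (l : List (Int × Int)) (d : PySem.Dict Int Int) (x : Int) :
    (l.foldl (fun d p => d.insert p.2 p.1) d).contains x
      = (d.contains x || l.any (fun p => p.2 == x)) := by
  induction l generalizing d with
  | nil => simp
  | cons p t ih =>
    simp [List.foldl, ih, PySem.Dict.contains_insert]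
    cases d.contains x <;> cases h : (p.2 == x) <;> simp [BEq.comm] at * <;> simp [h]

theorem scan_eq_any (ht : PySem.Dict Int Int) (l : List Int) :
    commonOne2Scan ht l = l.any (fun j => ht.contains j) := by
  induction l with
  | nil => rfl
  | cons j t ih => by_cases h : ht.contains j <;> simp [commonOne2Scan, h, ih]

theorem commonOne2_eq_true_iff (a1 a2 : List Int) :
    commonOne2 a1 a2 = true ↔ ∃ v, v ∈ a2 ∧ v ∈ a1 := by
  simp only [commonOne2, scan_eq_any, contains_foldl_insert, List.any_eq_true]
  constructor
  · rintro ⟨j, hj, h⟩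
    simp only [PySem.Dict.contains_empty, Bool.false_or, List.any_eq_true] at h
    obtain ⟨p, hp, hpx⟩ := h
    refine ⟨j, hj, ?_⟩
    obtain ⟨k, hk, rfl⟩ := (PySem.List.mem_enumerate_iff a1 0 p).mp hp
    have : a1[k] = j := by simpa using hpx
    exact this ▸ List.getElem_mem hk
  · rintro ⟨v, hv2, hv1⟩
    refine ⟨v, hv2, ?_⟩
    obtain ⟨k, hk, hvk⟩ := List.mem_iff_getElem.mp hv1
    simp only [PySem.Dict.contains_empty, Bool.false_or, List.any_eq_true]
    exact ⟨((0 : Int) + k, a1[k]), (PySem.List.mem_enumerate_iff a1 0 _).mpr ⟨k, hk, rfl⟩,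
      by simpa using hvk⟩

theorem merge_eq_true_iff (xs ys : List Int)
    (hx : xs.Pairwise (· ≤ ·)) (hy : ys.Pairwise (· ≤ ·)) :
    commonOne2Merge xs ys = true ↔ ∃ v, v ∈ xs ∧ v ∈ ys := by
  induction xs, ys using commonOne2Merge.induct with
  | case1 ys => simp [commonOne2Merge]
  | case2 x xs => simp [commonOne2Merge]
  | case3 a b c =>
    simp [commonOne2Merge]
  | case4 x xs y ys hne hlt ih =>
    have hytail : ∀ b ∈ ys, y ≤ b := fun b hb => (List.pairwise_cons.mp hy).1 b hb
    rw [commonOne2Merge]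
    simp only [if_neg hne, if_pos hlt]
    rw [ih (List.pairwise_cons.mp hx).2 hy]
    constructor
    · rintro ⟨v, hv1, hv2⟩; exact ⟨v, List.mem_cons_of_mem _ hv1, hv2⟩
    · rintro ⟨v, hv1, hv2⟩
      rcases List.mem_cons.mp hv1 with rfl | h
      · rcases List.mem_cons.mp hv2 with rfl | h2
        · exact absurd rfl hne
        · exact absurd (lt_of_lt_of_le hlt (hytail _ h2)) (lt_irrefl v)
      · exact ⟨v, h, hv2⟩
  | case5 x xs y ys hne hnlt ih =>
    have hgt : y < x := lt_of_le_of_ne (not_lt.mp hnlt) (fun h => hne h.symm)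
    have hxtail : ∀ b ∈ xs, x ≤ b := fun b hb => (List.pairwise_cons.mp hx).1 b hb
    rw [commonOne2Merge]
    simp only [if_neg hne, if_neg hnlt]
    rw [ih hx (List.pairwise_cons.mp hy).2]
    constructor
    · rintro ⟨v, hv1, hv2⟩; exact ⟨v, hv1, List.mem_cons_of_mem _ hv2⟩
    · rintro ⟨v, hv1, hv2⟩
      rcases List.mem_cons.mp hv2 with rfl | h
      · rcases List.mem_cons.mp hv1 with rfl | h1
        · exact absurd rfl hne
        · exact absurd (lt_of_lt_of_le hgt (hxtail _ h1)) (lt_irrefl v)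
      · exact ⟨v, hv1, h⟩

theorem alt_eq_true_iff (a1 a2 : List Int) :
    commonOne2_alt a1 a2 = true ↔ ∃ v, v ∈ a2 ∧ v ∈ a1 := by
  unfold commonOne2_alt
  rw [merge_eq_true_iff _ _ (PySem.List.sorted_pairwise a1 (fun x => x))
        (PySem.List.sorted_pairwise a2 (fun x => x))]
  constructor
  · rintro ⟨v, h1, h2⟩
    exact ⟨v, (PySem.List.mem_sorted _ _ _ _).mp h2, (PySem.List.mem_sorted _ _ _ _).mp h1⟩
  · rintro ⟨v, h2, h1⟩
    exact ⟨v, (PySem.List.mem_sorted _ _ _ _).mpr h1, (PySem.List.mem_sorted _ _ _ _).mpr h2⟩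

-- ===== VERDICT (by name: the statement is the Claim_ definition above) =====
theorem commonOne2_spec : Claim_equal_commonOne2 := by
  intro a1 a2 _
  unfold Spec_commonOne2
  rw [Bool.eq_iff_iff, commonOne2_eq_true_iff, alt_eq_true_iff]
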